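-- pv_equiv track=rewrite | github.com/whj9068/CSC384 | Sokoban_Starter/solution.py | manhattan_path
-- ===== SOURCE A (Python) =====
-- def manhattan_path(position1, position2):
--     '''return a list of every point on the manhattan path'''
--     '''INPUT: point1, point2'''
--     '''OUTPUT: list of points on the path'''
--     path = [position1]
--
--     if (position2[0]> position1[0]):
--         dir_x = 1
--     else:
--         dir_x = -1
--
--     if (position2[1]> position1[1]):
--         dir_y = 1
--     else:
--         dir_y = -1
--
--     for x in range(position1[0], position2[0], dir_x):
--         path.append((x + dir_x, position1[1]))
--
--     for y in range(position1[1], position2[1], dir_y):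
--         path.append((position2[0], y + dir_y))
--
--     return path
-- ===== SOURCE B (Python) =====
-- def manhattan_path(position1, position2):
--     path = [position1]
--     cur = position1
--     while cur != position2:
--         if cur[0] != position2[0]:
--             cur = (cur[0] + (1 if position2[0] > cur[0] else -1), cur[1])
--         else:
--             cur = (cur[0], cur[1] + (1 if position2[1] > cur[1] else -1))
--         path.append(cur)
--     return path
-- ===== Notes on version B (the rewrite author's own statement) =====
-- stated objective: alternative
-- what changed: Replaces A's two precomputed-direction range loops (x sweep then y sweep) with a single while-loop that walks one current point toward the target, recomputing the step direction from the current point each iteration.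
import Mathlib
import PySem

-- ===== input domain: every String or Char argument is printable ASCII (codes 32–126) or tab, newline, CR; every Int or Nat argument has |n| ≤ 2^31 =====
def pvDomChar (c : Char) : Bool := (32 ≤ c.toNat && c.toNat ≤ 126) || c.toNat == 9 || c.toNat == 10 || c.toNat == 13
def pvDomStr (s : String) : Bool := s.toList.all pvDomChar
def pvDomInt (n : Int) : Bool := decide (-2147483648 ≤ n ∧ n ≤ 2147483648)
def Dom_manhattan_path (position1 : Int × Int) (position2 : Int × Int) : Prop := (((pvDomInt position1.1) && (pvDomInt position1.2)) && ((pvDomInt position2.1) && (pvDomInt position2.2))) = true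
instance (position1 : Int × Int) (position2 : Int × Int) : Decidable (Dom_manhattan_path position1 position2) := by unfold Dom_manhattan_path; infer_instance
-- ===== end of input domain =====

-- B replaces A's two direction-precomputed range loops by a single stateful pointer walk
-- toward the target (objective: alternative decomposition, same output and cost).

-- ===== PORT A =====
def manhattan_path (position1 : Int × Int) (position2 : Int × Int) : List (Int × Int) :=
  let dir_x : Int := if position2.1 > position1.1 then 1 else -1
  let dir_y : Int := if position2.2 > position1.2 then 1 else -1
  let path : List (Int × Int) := [position1]
  let path := (PySem.List.pyRange position1.1 position2.1 dir_x).foldl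
      (fun acc x => acc ++ [(x + dir_x, position1.2)]) path
  let path := (PySem.List.pyRange position1.2 position2.2 dir_y).foldl
      (fun acc y => acc ++ [(position2.1, y + dir_y)]) path
  path

-- ===== PORT B =====
-- the while-loop of Source B: emit each successive point of the walk until cur = target
def mpLoop (cur target : Int × Int) : List (Int × Int) :=
  if _h : cur = target then []
  else if _hx : cur.1 ≠ target.1 then
    let nxt : Int × Int := (cur.1 + (if target.1 > cur.1 then 1 else -1), cur.2)
    nxt :: mpLoop nxt target
  else
    let nxt : Int × Int := (cur.1, cur.2 + (if target.2 > cur.2 then 1 else -1))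
    nxt :: mpLoop nxt target
termination_by ((target.1 - cur.1).natAbs + (target.2 - cur.2).natAbs)
decreasing_by
  · split_ifs <;> omega
  · have h2 : cur.2 ≠ target.2 := by
      intro hh
      exact _h (Prod.ext (not_not.mp _hx) hh)
    split_ifs <;> omega

def manhattan_path_alt (position1 : Int × Int) (position2 : Int × Int) : List (Int × Int) :=
  position1 :: mpLoop position1 position2

-- ===== PRECONDITION & SPEC =====
def Spec_manhattan_path (position1 : Int × Int) (position2 : Int × Int) (out : List (Int × Int)) : Prop := out = manhattan_path_alt position1 position2
instance (position1 : Int × Int) (position2 : Int × Int) (out : List (Int × Int)) : Decidable (Spec_manhattan_path position1 position2 out) := by unfold Spec_manhattan_path; infer_instance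

-- ===== CLAIM (what is proved, stated in full; the proofs are below) =====
def Claim_equal_manhattan_path : Prop := ∀ (position1 : Int × Int) (position2 : Int × Int), Dom_manhattan_path position1 position2 → Spec_manhattan_path position1 position2 (manhattan_path position1 position2)

-- ===== LEMMAS AND PROOFS =====

theorem foldl_app_map {α β : Type} (f : α → β) :
    ∀ (xs : List α) (init : List β),
      xs.foldl (fun acc x => acc ++ [f x]) init = init ++ xs.map f := by
  intro xs
  induction xs with
  | nil => simp
  | cons x xs ih => intro init; simp [List.foldl, ih]

theorem mpLoop_self (p : Int × Int) : mpLoop p p = [] := by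
  rw [mpLoop]; simp

theorem mpLoop_x_up (n : Nat) : ∀ (x y ty : Int),
    mpLoop (x, y) (x + n, ty) =
      (List.range n).map (fun k : Nat => ((x + k + 1 : Int), y)) ++ mpLoop (x + n, y) (x + n, ty) := by
  induction n with
  | zero => intro x y ty; simp
  | succ n ih =>
    intro x y ty
    rw [mpLoop]
    have hne : (x, y) ≠ (x + ((n : Int) + 1), ty) := by
      intro hh; have := congrArg Prod.fst hh; simp at this; omega
    rw [dif_neg (by exact_mod_cast hne)]
    rw [dif_pos (by push_cast; omega : ¬((x : Int) = x + ((n : Nat) + 1 : Nat)))]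
    simp only [if_pos (by push_cast; omega : ((x : Int) + ((n : Nat) + 1 : Nat) > x))]
    have hstep := ih (x + 1) y ty
    rw [show (x : Int) + ((n : Nat) + 1 : Nat) = (x + 1) + (n : Nat) by push_cast; ring]
    rw [hstep, List.range_succ_eq_map, List.map_cons, List.map_map]
    simp only [List.cons_append]
    congr 1
    · simp
    · congr 1
      apply List.map_congr_left; intro k _
      simp [Prod.ext_iff]; ring

theorem mpLoop_x_down (n : Nat) : ∀ (x y ty : Int),
    mpLoop (x, y) (x - n, ty) =
      (List.range n).map (fun k : Nat => ((x - k - 1 : Int), y)) ++ mpLoop (x - n, y) (x - n, ty) := by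
  induction n with
  | zero => intro x y ty; simp
  | succ n ih =>
    intro x y ty
    rw [mpLoop]
    have hne : (x, y) ≠ (x - ((n : Int) + 1), ty) := by
      intro hh; have := congrArg Prod.fst hh; simp at this; omega
    rw [dif_neg (by exact_mod_cast hne)]
    rw [dif_pos (by push_cast; omega : ¬((x : Int) = x - ((n : Nat) + 1 : Nat)))]
    simp only [if_neg (by push_cast; omega : ¬((x : Int) - ((n : Nat) + 1 : Nat) > x))]
    rw [show (x : Int) + -1 = x - 1 by ring]
    have hstep := ih (x - 1) y ty
    rw [show (x : Int) - ((n : Nat) + 1 : Nat) = (x - 1) - (n : Nat) by push_cast; ring]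
    rw [hstep, List.range_succ_eq_map, List.map_cons, List.map_map]
    simp only [List.cons_append]
    congr 1
    · simp
    · congr 1
      apply List.map_congr_left; intro k _
      simp [Prod.ext_iff]; ring_nf

theorem mpLoop_y_up (n : Nat) : ∀ (a y : Int),
    mpLoop (a, y) (a, y + n) = (List.range n).map (fun k : Nat => (a, (y + k + 1 : Int))) := by
  induction n with
  | zero => intro a y; simp [mpLoop_self]
  | succ n ih =>
    intro a y
    rw [mpLoop]
    have hne : (a, y) ≠ (a, y + ((n : Int) + 1)) := by
      intro hh; have := congrArg Prod.snd hh; simp at this; omega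
    rw [dif_neg (by exact_mod_cast hne)]
    rw [dif_neg (by simp)]
    simp only [if_pos (by push_cast; omega : ((y : Int) + ((n : Nat) + 1 : Nat) > y))]
    have hstep := ih a (y + 1)
    rw [show (y : Int) + ((n : Nat) + 1 : Nat) = (y + 1) + (n : Nat) by push_cast; ring]
    rw [hstep, List.range_succ_eq_map, List.map_cons, List.map_map]
    congr 1
    · simp
    · apply List.map_congr_left; intro k _
      simp [Prod.ext_iff]; ring

theorem mpLoop_y_down (n : Nat) : ∀ (a y : Int),
    mpLoop (a, y) (a, y - n) = (List.range n).map (fun k : Nat => (a, (y - k - 1 : Int))) := by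
  induction n with
  | zero => intro a y; simp [mpLoop_self]
  | succ n ih =>
    intro a y
    rw [mpLoop]
    have hne : (a, y) ≠ (a, y - ((n : Int) + 1)) := by
      intro hh; have := congrArg Prod.snd hh; simp at this; omega
    rw [dif_neg (by exact_mod_cast hne)]
    rw [dif_neg (by simp)]
    simp only [if_neg (by push_cast; omega : ¬((y : Int) - ((n : Nat) + 1 : Nat) > y))]
    rw [show (y : Int) + -1 = y - 1 by ring]
    have hstep := ih a (y - 1)
    rw [show (y : Int) - ((n : Nat) + 1 : Nat) = (y - 1) - (n : Nat) by push_cast; ring]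
    rw [hstep, List.range_succ_eq_map, List.map_cons, List.map_map]
    congr 1
    · simp
    · apply List.map_congr_left; intro k _
      simp [Prod.ext_iff]; ring_nf

theorem walk_y (a y1 y2 : Int) :
    mpLoop (a, y1) (a, y2) =
      (PySem.List.pyRange y1 y2 (if y2 > y1 then 1 else -1)).map
        (fun y => (a, y + (if y2 > y1 then 1 else -1))) := by
  by_cases hy : y2 > y1
  · have hn : y2 = y1 + ((y2 - y1).toNat : Int) := by omega
    rw [if_pos hy, PySem.List.pyRange_one, hn, mpLoop_y_up, List.map_map]
    rw [show (y1 + ((y2 - y1).toNat : Int) - y1).toNat = (y2 - y1).toNat by omega]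
    apply List.map_congr_left; intro k _
    simp
  · have hn : y2 = y1 - ((y1 - y2).toNat : Int) := by omega
    rw [if_neg hy, PySem.List.pyRange_neg_one, hn, mpLoop_y_down, List.map_map]
    rw [show (y1 - (y1 - ((y1 - y2).toNat : Int))).toNat = (y1 - y2).toNat by omega]
    apply List.map_congr_left; intro k _
    simp [Prod.ext_iff]
    omega

theorem walk_eq (x1 y1 x2 y2 : Int) :
    mpLoop (x1, y1) (x2, y2) =
      (PySem.List.pyRange x1 x2 (if x2 > x1 then 1 else -1)).map
        (fun x => (x + (if x2 > x1 then 1 else -1), y1))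
      ++ (PySem.List.pyRange y1 y2 (if y2 > y1 then 1 else -1)).map
        (fun y => (x2, y + (if y2 > y1 then 1 else -1))) := by
  by_cases hx : x2 > x1
  · have hn : x2 = x1 + ((x2 - x1).toNat : Int) := by omega
    rw [if_pos hx, PySem.List.pyRange_one, hn, mpLoop_x_up, List.map_map, walk_y]
    congr 1
    rw [show (x1 + ((x2 - x1).toNat : Int) - x1).toNat = (x2 - x1).toNat by omega]
    apply List.map_congr_left; intro k _
    simp
  · have hn : x2 = x1 - ((x1 - x2).toNat : Int) := by omega
    rw [if_neg hx, PySem.List.pyRange_neg_one, hn, mpLoop_x_down, List.map_map, walk_y]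
    congr 1
    rw [show (x1 - (x1 - ((x1 - x2).toNat : Int))).toNat = (x1 - x2).toNat by omega]
    apply List.map_congr_left; intro k _
    simp [Prod.ext_iff]
    omega

-- ===== VERDICT (by name: the statement is the Claim_ definition above) =====
theorem manhattan_path_spec : Claim_equal_manhattan_path := by
  intro p1 p2 _
  unfold Spec_manhattan_path manhattan_path manhattan_path_alt
  obtain ⟨x1, y1⟩ := p1
  obtain ⟨x2, y2⟩ := p2
  simp only [foldl_app_map, walk_eq]
  simp
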